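-- pv_equiv track=rewrite | github.com/KirbysGit/taylor.io | backend/ai/post_processing/resume_diff.py | _inversion_pair_count
-- ===== SOURCE A (Python) =====
-- def _inversion_pair_count(plan_order, hero_ids, all_ids):
--     # --- Pairs (non_hero, hero) where the non-hero ranks above the hero in plan order (higher plan signal skipped). --- #
--     hset = {x for x in hero_ids if x is not None}
--     all_s = [x for x in (all_ids or []) if isinstance(x, int)]
--     non = [n for n in all_s if n not in hset]
--     im = {iid: i for i, iid in enumerate(plan_order or [])}
--     default = len(plan_order or []) + 1
--
--     def pos(iid):
--         return im.get(iid, default)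
--
--     n_pairs = 0
--     for h in hero_ids:
--         if h is None or h not in hset:
--             continue
--         ph = pos(h)
--         for n in non:
--             if pos(n) < ph:
--                 n_pairs += 1
--     return n_pairs
-- ===== SOURCE B (Python) =====
-- def _inversion_pair_count(plan_order, hero_ids, all_ids):
--     # Sort the plan positions once, then count all pairs with a single two-pointer merge scan.
--     hset = {x for x in hero_ids if x is not None}
--     im = {iid: i for i, iid in enumerate(plan_order or [])}
--     default = len(plan_order or []) + 1
--     non_pos = sorted(im.get(n, default)
--                      for n in (all_ids or [])
--                      if isinstance(n, int) and n not in hset)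
--     hero_pos = sorted(im.get(h, default) for h in hero_ids if h is not None)
--     total = 0
--     j = 0
--     m = len(non_pos)
--     for ph in hero_pos:
--         while j < m and non_pos[j] < ph:
--             j += 1
--         total += j
--     return total
-- ===== Notes on version B (the rewrite author's own statement) =====
-- stated objective: faster
-- what changed: Replaces A's hero-by-non-hero double loop (a position lookup per pair) with sorting the non-hero and hero plan positions once and counting all pairs in a single two-pointer merge scan.
import Mathlib
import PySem

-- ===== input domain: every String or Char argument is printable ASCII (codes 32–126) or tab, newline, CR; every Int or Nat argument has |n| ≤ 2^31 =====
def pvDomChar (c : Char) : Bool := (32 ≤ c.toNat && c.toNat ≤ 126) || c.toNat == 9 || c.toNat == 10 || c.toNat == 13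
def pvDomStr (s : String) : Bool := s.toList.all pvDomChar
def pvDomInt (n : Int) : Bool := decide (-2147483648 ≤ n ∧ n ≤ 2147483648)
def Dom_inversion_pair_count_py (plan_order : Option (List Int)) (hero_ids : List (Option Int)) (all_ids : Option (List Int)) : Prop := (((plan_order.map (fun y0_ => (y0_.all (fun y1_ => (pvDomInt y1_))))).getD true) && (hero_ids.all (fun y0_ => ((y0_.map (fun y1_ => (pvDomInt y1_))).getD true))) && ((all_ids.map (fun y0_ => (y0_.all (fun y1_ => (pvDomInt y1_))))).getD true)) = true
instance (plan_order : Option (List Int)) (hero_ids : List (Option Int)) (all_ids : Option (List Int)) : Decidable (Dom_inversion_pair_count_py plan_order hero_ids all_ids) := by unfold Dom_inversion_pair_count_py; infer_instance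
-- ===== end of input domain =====

-- B replaces A's hero × non-hero double loop by sorting the plan positions once and
-- accumulating all pair counts in a single two-pointer merge scan (objective: faster).

-- ===== PORT A =====
-- shared helper: im = {iid: i for i, iid in enumerate(plan_order or [])} (both Pythons build it identically)
def pvIm (plan : List Int) : PySem.Dict Int Int :=
  (PySem.List.enumerate plan).foldl (fun d p => d.insert p.2 p.1) PySem.Dict.empty

def inversion_pair_count_py (plan_order : Option (List Int)) (hero_ids : List (Option Int)) (all_ids : Option (List Int)) : Int :=
  let hset : PySem.Set Int := PySem.Set.ofList (hero_ids.filterMap (fun x => x))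
  let all_s : List Int := all_ids.getD []   -- 'isinstance(x, int)' is always True for elements of a List Int
  let non : List Int := all_s.filter (fun n => !(PySem.Set.contains hset n))
  let im := pvIm (plan_order.getD [])
  let dflt : Int := ((plan_order.getD []).length : Int) + 1
  hero_ids.foldl (fun n_pairs h =>
    match h with
    | none => n_pairs
    | some hv =>
      if !(PySem.Set.contains hset hv) then n_pairs
      else
        non.foldl (fun acc n => if im.getD n dflt < im.getD hv dflt then acc + 1 else acc) n_pairs) 0

-- ===== PORT B =====
-- the 'while j < m and non_pos[j] < ph: j += 1' inner loop
def pvAdvance (np : List Int) (ph : Int) (j : Nat) : Nat :=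
  if h : j < np.length ∧ np.getD j 0 < ph then pvAdvance np ph (j + 1) else j
termination_by np.length - j
decreasing_by omega

-- the 'for ph in hero_pos' loop with accumulators (total, j)
def pvLoop (np : List Int) (hp : List Int) (total : Int) (j : Nat) : Int :=
  match hp with
  | [] => total
  | ph :: rest => pvLoop np rest (total + (pvAdvance np ph j : Int)) (pvAdvance np ph j)

def inversion_pair_count_py_alt (plan_order : Option (List Int)) (hero_ids : List (Option Int)) (all_ids : Option (List Int)) : Int :=
  let hset : PySem.Set Int := PySem.Set.ofList (hero_ids.filterMap (fun x => x))
  let im := pvIm (plan_order.getD [])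
  let dflt : Int := ((plan_order.getD []).length : Int) + 1
  let non_pos := PySem.List.sorted
    (((all_ids.getD []).filter (fun n => !(PySem.Set.contains hset n))).map (fun n => im.getD n dflt))
    (fun x => x) false
  let hero_pos := PySem.List.sorted
    ((hero_ids.filterMap (fun x => x)).map (fun h => im.getD h dflt))
    (fun x => x) false
  pvLoop non_pos hero_pos 0 0

-- ===== PRECONDITION & SPEC =====
def Spec_inversion_pair_count_py (plan_order : Option (List Int)) (hero_ids : List (Option Int)) (all_ids : Option (List Int)) (out : Int) : Prop := out = inversion_pair_count_py_alt plan_order hero_ids all_ids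
instance (plan_order : Option (List Int)) (hero_ids : List (Option Int)) (all_ids : Option (List Int)) (out : Int) : Decidable (Spec_inversion_pair_count_py plan_order hero_ids all_ids out) := by unfold Spec_inversion_pair_count_py; infer_instance

-- ===== CLAIM (what is proved, stated in full; the proofs are below) =====
def Claim_equal_inversion_pair_count_py : Prop := ∀ (plan_order : Option (List Int)) (hero_ids : List (Option Int)) (all_ids : Option (List Int)), Dom_inversion_pair_count_py plan_order hero_ids all_ids → Spec_inversion_pair_count_py plan_order hero_ids all_ids (inversion_pair_count_py plan_order hero_ids all_ids)

-- ===== LEMMAS AND PROOFS =====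

-- if every element of l is ≥ ph, nothing in l is < ph
theorem pv_countP_zero (l : List Int) (ph : Int) (h : ∀ x ∈ l, ph ≤ x) :
    l.countP (fun x => decide (x < ph)) = 0 := by
  rw [List.countP_eq_zero]
  intro a ha
  simp only [decide_eq_true_eq, not_lt]
  exact h a ha

-- on a sorted list, "np[i] < ph" holds exactly for the first countP indices
theorem pv_sorted_count_iff (np : List Int) (ph : Int) (hs : np.Pairwise (· ≤ ·)) :
    ∀ i, i < np.length → (np.getD i 0 < ph ↔ i < np.countP (fun x => decide (x < ph))) := by
  induction np with
  | nil => intro i hi; simp at hi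
  | cons a l ih =>
    rcases List.pairwise_cons.1 hs with ⟨ha, hl⟩
    intro i hi
    cases i with
    | zero =>
      by_cases hlt : a < ph
      · simp [hlt]
      · have hz : l.countP (fun x => decide (x < ph)) = 0 :=
          pv_countP_zero l ph (fun x hx => le_trans (not_lt.1 hlt) (ha x hx))
        simp [hlt, hz]
    | succ k =>
      have hk : k < l.length := by simpa using hi
      have hiff := ih hl k hk
      by_cases hlt : a < ph
      · simp only [List.getD_cons_succ, List.countP_cons, hlt]
        simpa [Nat.succ_lt_succ_iff] using hiff
      · have hz : l.countP (fun x => decide (x < ph)) = 0 :=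
          pv_countP_zero l ph (fun x hx => le_trans (not_lt.1 hlt) (ha x hx))
        simp only [List.getD_cons_succ, List.countP_cons, hlt]
        simp [hz] at hiff ⊢
        omega

theorem pv_advance_eq (np : List Int) (ph : Int) (hs : np.Pairwise (· ≤ ·)) :
    ∀ j, j ≤ np.length → (∀ k, k < j → np.getD k 0 < ph) →
      pvAdvance np ph j = np.countP (fun x => decide (x < ph)) := by
  intro j
  induction hn : np.length - j using Nat.strong_induction_on generalizing j with
  | _ n ih =>
  intro hj hpre
  rw [pvAdvance]
  by_cases hc : j < np.length ∧ np.getD j 0 < ph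
  · have hjc : j < np.countP (fun x => decide (x < ph)) :=
      (pv_sorted_count_iff np ph hs j hc.1).1 hc.2
    rw [dif_pos hc]
    subst hn
    exact ih (np.length - (j + 1)) (by omega) (j + 1) rfl (by omega) (by
      intro k hk
      rcases Nat.lt_succ_iff_lt_or_eq.1 hk with h | h
      · exact hpre k h
      · subst h; exact hc.2)
  · rw [dif_neg hc]
    have hle : np.countP (fun x => decide (x < ph)) ≤ np.length := List.countP_le_length
    by_contra hne
    rcases Nat.lt_or_ge j (np.countP (fun x => decide (x < ph))) with h | h
    · have hjlen : j < np.length := lt_of_lt_of_le h hle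
      exact hc ⟨hjlen, (pv_sorted_count_iff np ph hs j hjlen).2 h⟩
    · have hcj : np.countP (fun x => decide (x < ph)) < j := by omega
      have hclen : np.countP (fun x => decide (x < ph)) < np.length := lt_of_lt_of_le hcj hj
      have := (pv_sorted_count_iff np ph hs _ hclen).1 (hpre _ hcj)
      omega

theorem pv_loop_eq (np : List Int) (hs : np.Pairwise (· ≤ ·)) :
    ∀ (hp : List Int), hp.Pairwise (· ≤ ·) →
    ∀ (total : Int) (j : Nat), j ≤ np.length →
      (∀ k, k < j → ∀ ph ∈ hp, np.getD k 0 < ph) →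
      pvLoop np hp total j =
        total + (hp.map (fun ph => (np.countP (fun x => decide (x < ph)) : Int))).sum := by
  intro hp
  induction hp with
  | nil => intro _ total j _ _; simp [pvLoop]
  | cons ph rest ih =>
    intro hph total j hj hpre
    rcases List.pairwise_cons.1 hph with ⟨hhead, hrest⟩
    have hadv : pvAdvance np ph j = np.countP (fun x => decide (x < ph)) :=
      pv_advance_eq np ph hs j hj (fun k hk => hpre k hk ph List.mem_cons_self)
    have hle : np.countP (fun x => decide (x < ph)) ≤ np.length := List.countP_le_length
    rw [pvLoop]
    rw [hadv]
    rw [ih hrest _ _ hle (by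
      intro k hk ph' hph'
      have hk' : k < np.length := lt_of_lt_of_le hk hle
      have : np.getD k 0 < ph := (pv_sorted_count_iff np ph hs k hk').2 hk
      exact lt_of_lt_of_le this (hhead ph' hph'))]
    simp only [List.map_cons, List.sum_cons]
    ring

-- A's outer loop (with the always-true 'h in hset' test) as a sum over the non-None heroes
theorem pv_fold_A (s : PySem.Set Int) (pos : Int → Int) (non : List Int) :
    ∀ (hs : List (Option Int)) (acc : Int),
      (∀ v : Int, some v ∈ hs → PySem.Set.contains s v = true) →
      hs.foldl (fun n_pairs h =>
        match h with
        | none => n_pairs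
        | some hv =>
          if !(PySem.Set.contains s hv) then n_pairs
          else non.foldl (fun acc n => if pos n < pos hv then acc + 1 else acc) n_pairs) acc
      = acc + ((hs.filterMap (fun x => x)).map
          (fun hv => ((non.map pos).countP (fun x => decide (x < pos hv)) : Int))).sum := by
  intro hs
  induction hs with
  | nil => intro acc _; simp
  | cons h t ih =>
    intro acc hmem
    cases h with
    | none =>
      simp only [List.foldl_cons, List.filterMap_cons]
      exact ih acc (fun v hv => hmem v (List.mem_cons_of_mem _ hv))
    | some hv =>
      have hc : PySem.Set.contains s hv = true := hmem hv List.mem_cons_self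
      simp only [List.foldl_cons, List.filterMap_cons, hc, Bool.not_true, Bool.false_eq_true,
        if_false, List.map_cons, List.sum_cons]
      rw [PySem.List.foldl_ite_add_one]
      rw [ih _ (fun v hv' => hmem v (List.mem_cons_of_mem _ hv'))]
      rw [List.countP_map]
      have : ((fun x => decide (x < pos hv)) ∘ pos) = fun n => decide (pos n < pos hv) := rfl
      rw [this]
      ring

-- ===== VERDICT (by name: the statement is the Claim_ definition above) =====
theorem inversion_pair_count_py_spec : Claim_equal_inversion_pair_count_py := by
  intro plan_order hero_ids all_ids _
  unfold Spec_inversion_pair_count_py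
  unfold inversion_pair_count_py inversion_pair_count_py_alt
  simp only []
  set H : List Int := hero_ids.filterMap (fun x => x) with hH
  set hset : PySem.Set Int := PySem.Set.ofList H with hhset
  set im := pvIm (plan_order.getD []) with him
  set dflt : Int := ((plan_order.getD []).length : Int) + 1 with hdflt
  set pos : Int → Int := fun x => im.getD x dflt with hpos
  set NP : List Int :=
    ((all_ids.getD []).filter (fun n => !(PySem.Set.contains hset n))).map pos with hNP
  set np := PySem.List.sorted NP (fun x => x) false with hnp
  set hp := PySem.List.sorted (H.map pos) (fun x => x) false with hhp
  have hnps : np.Pairwise (· ≤ ·) := by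
    have := PySem.List.sorted_pairwise (xs := NP) (key := fun x => x)
    simpa using this
  have hhps : hp.Pairwise (· ≤ ·) := by
    have := PySem.List.sorted_pairwise (xs := H.map pos) (key := fun x => x)
    simpa using this
  -- A side
  rw [pv_fold_A hset pos _ hero_ids 0 (by
    intro v hv
    rw [PySem.Set.contains_iff, hhset, PySem.Set.mem_ofList, hH]
    exact List.mem_filterMap.2 ⟨some v, hv, rfl⟩)]
  -- B side
  rw [pv_loop_eq np hnps hp hhps 0 0 (Nat.zero_le _) (by intro k hk; omega)]
  -- identify the two sums
  have hperm_np : np.Perm NP := PySem.List.sorted_perm ..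
  have hperm_hp : hp.Perm (H.map pos) := PySem.List.sorted_perm ..
  have hmapeq : (hp.map (fun ph => (np.countP (fun x => decide (x < ph)) : Int)))
      = hp.map (fun ph => (NP.countP (fun x => decide (x < ph)) : Int)) := by
    apply List.map_congr_left
    intro ph _
    rw [hperm_np.countP_eq]
  rw [hmapeq]
  have hsum : (hp.map (fun ph => (NP.countP (fun x => decide (x < ph)) : Int))).sum
      = ((H.map pos).map (fun ph => (NP.countP (fun x => decide (x < ph)) : Int))).sum :=
    (hperm_hp.map _).sum_eq
  rw [hsum, List.map_map]
  simp only [hNP, List.countP_map]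
  rfl
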